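-- pv_equiv track=rewrite | github.com/yubinbai/pcuva-problems | UVa 10440 - Ferry Loading II/main.py | solve
-- ===== SOURCE A (Python) =====
-- def solve(par):
--     N, T, M, cars = par
--     time = 0
--     trips = 0
--     capacity = N
--     for c in cars:
--         if capacity == 0:
--             time += T * 2
--             trips += 1
--             capacity = N
--         capacity -= 1
--         time = max(time, c)
--     if capacity != N:
--         trips += 1
--         time = max(cars[-1] + T, time)
--     return '%d %d' % (time, trips)
-- ===== SOURCE B (Python) =====
-- def solve(par):
--     N, T, M, cars = par
--     if not cars:
--         return '0 0'
--     time = 0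
--     trips = 0
--     rest = cars
--     while rest:
--         batch, rest = rest[:N], rest[N:]
--         if trips:
--             time += 2 * T
--         time = max(time, max(batch))
--         trips += 1
--     return '%d %d' % (max(time, cars[-1] + T), trips)
-- ===== Notes on version B (the rewrite author's own statement) =====
-- stated objective: alternative
-- what changed: B replaces A's per-car countdown state machine (capacity counter, boundary trigger inside the loop) with a batch-at-a-time loop that slices off one ferry load per iteration and folds the max-recurrence time = max(time + 2T, max(batch)) over loads.
-- outside the precondition, e.g. on solve((0, 3, 2, [1, 2])): A returns '6 2', B raises ValueError; on solve((-1, 3, 2, [1, 2])): A returns '5 1', B raises ValueError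
import Mathlib
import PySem

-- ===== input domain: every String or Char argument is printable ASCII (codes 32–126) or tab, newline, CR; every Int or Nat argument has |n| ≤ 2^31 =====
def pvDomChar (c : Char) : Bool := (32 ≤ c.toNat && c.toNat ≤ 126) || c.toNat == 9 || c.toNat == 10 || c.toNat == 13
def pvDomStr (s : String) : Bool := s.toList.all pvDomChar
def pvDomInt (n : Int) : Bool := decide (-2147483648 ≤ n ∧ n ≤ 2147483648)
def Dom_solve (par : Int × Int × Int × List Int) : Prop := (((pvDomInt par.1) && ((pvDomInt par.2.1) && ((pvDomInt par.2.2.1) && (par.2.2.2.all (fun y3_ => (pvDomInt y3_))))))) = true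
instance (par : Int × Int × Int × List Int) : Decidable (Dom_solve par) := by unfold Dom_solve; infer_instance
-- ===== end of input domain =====

-- B replaces A's per-car capacity-countdown state machine with a batch-at-a-time loop
-- (slice off one ferry load per iteration, fold time = max(time + 2T, max(batch))):
-- a structurally different decomposition of the same O(M) computation.

-- ===== PORT A =====
-- one iteration of A's for-loop over cars; state = (time, trips, capacity)
def stepA (N T : Int) (st : Int × Int × Int) (c : Int) : Int × Int × Int :=
  let time := if st.2.2 = 0 then st.1 + T * 2 else st.1
  let trips := if st.2.2 = 0 then st.2.1 + 1 else st.2.1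
  let capacity := (if st.2.2 = 0 then N else st.2.2) - 1
  (max time c, trips, capacity)

def solve (par : Int × Int × Int × List Int) : String :=
  let N := par.1
  let T := par.2.1
  let cars := par.2.2.2
  let st := cars.foldl (stepA N T) (0, 0, N)
  if st.2.2 ≠ N then
    let trips := st.2.1 + 1
    let time := max (PySem.List.pyGetD cars (-1) 0 + T) st.1
    PySem.Int.toStr time ++ " " ++ PySem.Int.toStr trips
  else
    PySem.Int.toStr st.1 ++ " " ++ PySem.Int.toStr st.2.1

-- ===== PORT B =====
-- B's while-loop: each pass splits off rest[:N] / rest[N:]; fuel = cars.length bounds the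
-- iteration count (for N ≥ 1 each pass removes at least one element, so the fuel never runs out).
def loopB (N T : Int) : Nat → Int × Int → List Int → Int × Int
  | _, st, [] => st
  | 0, st, _ => st
  | fuel+1, st, rest =>
      let batch := PySem.List.slice rest none (some N)
      let rest' := PySem.List.slice rest (some N) none
      let time := if st.2 ≠ 0 then st.1 + 2 * T else st.1
      let time := max time ((PySem.List.max? batch id).getD 0)
      loopB N T fuel (time, st.2 + 1) rest'

def solve_alt (par : Int × Int × Int × List Int) : String :=
  let N := par.1
  let T := par.2.1
  let cars := par.2.2.2
  if cars.isEmpty then "0 0"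
  else
    let st := loopB N T cars.length (0, 0) cars
    PySem.Int.toStr (max st.1 (PySem.List.pyGetD cars (-1) 0 + T)) ++ " " ++ PySem.Int.toStr st.2

-- ===== PRECONDITION & SPEC =====
-- Pre_ excludes non-positive ferry capacity N ≤ 0 (with cars waiting): that is outside the
-- problem's natural domain, and there A's countdown loop still returns accidental values
-- (one spurious extra round trip for N = 0, a single unbounded load for N < 0) while B's
-- batch loop raises (max of an empty batch).
def Pre_solve (par : Int × Int × Int × List Int) : Prop := 1 ≤ par.1 ∨ par.2.2.2 = []
instance (par : Int × Int × Int × List Int) : Decidable (Pre_solve par) := by unfold Pre_solve; infer_instance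

def pvWitness_solve : (Int × Int × Int × List Int) := (2, 10, 3, [0, 10, 30])

def Spec_solve (par : Int × Int × Int × List Int) (out : String) : Prop := out = solve_alt par
instance (par : Int × Int × Int × List Int) (out : String) : Decidable (Spec_solve par out) := by unfold Spec_solve; infer_instance

-- ===== CLAIM (what is proved, stated in full; the proofs are below) =====
def Claim_equal_solve : Prop := ∀ (par : Int × Int × Int × List Int), Dom_solve par → Pre_solve par → Spec_solve par (solve par)

-- ===== LEMMAS AND PROOFS =====

-- common recurrence over ferry loads: m = N - 1 further cars after the batch's head;
-- returns (final loop time, number of loads)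
def specT (T : Int) (m : Nat) : Int → List Int → Int × Int
  | time, [] => (time, 0)
  | time, c :: cs =>
      let mx := (cs.take m).foldl max (max time c)
      match h : cs.drop m with
      | [] => (mx, 1)
      | d :: ds =>
          let p := specT T m (mx + 2*T) (d :: ds)
          (p.1, p.2 + 1)
  termination_by _ l => l.length
  decreasing_by
    have hlen : (d :: ds).length ≤ cs.length := by
      rw [← h, List.length_drop]; omega
    simp at hlen ⊢; omega

-- unfolding equations for the load recurrence
theorem specT_cons (T : Int) (m : Nat) (time c : Int) (cs : List Int) :
    specT T m time (c :: cs) =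
      (match cs.drop m with
       | [] => ((cs.take m).foldl max (max time c), 1)
       | d :: ds =>
           ((specT T m ((cs.take m).foldl max (max time c) + 2*T) (d :: ds)).1,
            (specT T m ((cs.take m).foldl max (max time c) + 2*T) (d :: ds)).2 + 1)) := by
  rw [specT]
  cases h : cs.drop m with
  | nil => simp
  | cons d ds => simp

theorem specT_cons_nil (T : Int) (m : Nat) (time c : Int) (cs : List Int)
    (h : cs.drop m = []) :
    specT T m time (c :: cs) = ((cs.take m).foldl max (max time c), 1) := by
  rw [specT_cons, h]

theorem specT_cons_cons (T : Int) (m : Nat) (time c : Int) (cs : List Int)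
    (d : Int) (ds : List Int) (h : cs.drop m = d :: ds) :
    specT T m time (c :: cs) =
      ((specT T m ((cs.take m).foldl max (max time c) + 2*T) (d :: ds)).1,
       (specT T m ((cs.take m).foldl max (max time c) + 2*T) (d :: ds)).2 + 1) := by
  rw [specT_cons, h]

-- A's fold, no boundary hit: capacity at least the list length
theorem foldA_no_boundary (N T : Int) (l : List Int) :
    ∀ (time trips k : Int), (l.length : Int) ≤ k →
      l.foldl (stepA N T) (time, trips, k) = (l.foldl max time, trips, k - l.length) := by
  induction l with
  | nil => intro time trips k _; simp
  | cons c cs ih =>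
      intro time trips k hk
      have hk0 : ¬ (k = 0) := by simp at hk; omega
      simp only [List.foldl_cons, stepA]
      rw [if_neg hk0, if_neg hk0, if_neg hk0]
      rw [ih (max time c) trips (k - 1) (by simp at hk ⊢; omega)]
      simp; omega

-- A's boundary step: from capacity 0 the next car behaves like a fresh load after +2T
theorem foldA_boundary (N T : Int) (hN : ¬ (N = 0)) (x : Int) (xs : List Int)
    (time trips : Int) :
    (x :: xs).foldl (stepA N T) (time, trips, 0) =
      (x :: xs).foldl (stepA N T) (time + T * 2, trips + 1, N) := by
  simp only [List.foldl_cons, stepA, hN]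
  norm_num

-- folding max commutes with an outer max
theorem foldl_max_outer (l : List Int) : ∀ (a x : Int),
    l.foldl max (max a x) = max a (l.foldl max x) := by
  induction l with
  | nil => intro a x; rfl
  | cons c cs ih =>
      intro a x
      simp only [List.foldl_cons, max_assoc]
      exact ih a (max x c)

-- PySem.List.max? of a nonempty Int list is its foldl-max
theorem maxq_foldl (l : List Int) : ∀ (x : Int),
    (PySem.List.max? (x :: l) id).getD 0 = l.foldl max x := by
  induction l with
  | nil => intro x; rfl
  | cons c cs ih =>
      intro x
      have h1 : PySem.List.max? (x :: c :: cs) id = PySem.List.max? (max x c :: cs) id := by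
        simp only [PySem.List.max?, List.foldl_cons, id]
        congr 1
        by_cases h : x < c
        · simp [h, max_eq_right (le_of_lt h)]
        · simp [h, max_eq_left (le_of_not_gt h)]
      rw [h1, ih (max x c)]
      simp

-- A's whole loop from a fresh ferry equals the load recurrence (capacity ends ≠ N)
theorem foldA_spec (N T : Int) (hN : 1 ≤ N) :
    ∀ (n : Nat) (cars : List Int), cars.length ≤ n → cars ≠ [] → ∀ (time trips : Int),
      ∃ cap : Int, cap ≠ N ∧
        cars.foldl (stepA N T) (time, trips, N) =
          ((specT T (N.toNat - 1) time cars).1,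
           trips + (specT T (N.toNat - 1) time cars).2 - 1, cap) := by
  intro n
  induction n with
  | zero => intro cars hlen hne; cases cars <;> simp_all
  | succ n ih =>
      intro cars hlen hne time trips
      match cars with
      | c :: cs =>
        set m := N.toNat - 1 with hm
        have hNt : (N.toNat : Int) = N := Int.toNat_of_nonneg (by omega)
        cases hdrop : cs.drop m with
        | nil =>
            have hcslen : cs.length ≤ m := by
              by_contra hc
              have h2 : cs.drop m ≠ [] := by
                intro h3
                have := congrArg List.length h3
                simp only [List.length_drop] at this
                simp at this; omega
              exact h2 hdrop
            have hlenN : ((c :: cs).length : Int) ≤ N := by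
              simp only [List.length_cons]; push_cast; omega
            rw [foldA_no_boundary N T (c :: cs) time trips N hlenN]
            refine ⟨N - (c :: cs).length, by simp; omega, ?_⟩
            rw [specT_cons_nil T m time c cs hdrop]
            have htake : cs.take m = cs := List.take_of_length_le hcslen
            simp [htake]
        | cons d ds =>
            have hmlt : m < cs.length := by
              by_contra hc
              have : cs.drop m = [] := List.drop_eq_nil_of_le (by omega)
              simp [this] at hdrop
            have hsplit : c :: cs = (c :: cs.take m) ++ (d :: ds) := by
              rw [← hdrop]; simp
            have hblenN : ((c :: cs.take m).length : Int) = N := by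
              simp only [List.length_cons, List.length_take]
              have : min m cs.length = m := min_eq_left (le_of_lt hmlt)
              rw [this]; omega
            have hL : List.foldl (stepA N T) (time, trips, N) (c :: cs) =
                List.foldl (stepA N T)
                  ((c :: cs.take m).foldl max time + T * 2, trips + 1, N) (d :: ds) := by
              conv_lhs => rw [hsplit]
              rw [List.foldl_append,
                  foldA_no_boundary N T (c :: cs.take m) time trips N (le_of_eq hblenN),
                  hblenN, sub_self, foldA_boundary N T (by omega) d ds]
            rw [hL]
            have hdlen : (d :: ds).length ≤ n := by
              have h1 : (d :: ds).length ≤ cs.length := by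
                rw [← hdrop, List.length_drop]; omega
              simp only [List.length_cons] at hlen h1 ⊢
              omega
            obtain ⟨cap, hcapne, hrec⟩ :=
              ih (d :: ds) hdlen (by simp) ((c :: cs.take m).foldl max time + T * 2) (trips + 1)
            refine ⟨cap, hcapne, ?_⟩
            rw [hrec]
            have h2T : (c :: cs.take m).foldl max time + T * 2 =
                (cs.take m).foldl max (max time c) + 2 * T := by
              simp only [List.foldl_cons]; ring
            rw [h2T, specT_cons_cons T m time c cs d ds hdrop]
            refine Prod.ext rfl (Prod.ext (by ring) rfl)

-- B's loop on an exhausted list returns its state (any fuel)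
theorem loopB_nil (N T : Int) (fuel : Nat) (st : Int × Int) :
    loopB N T fuel st [] = st := by
  cases fuel <;> rfl

-- B's loop from trips ≥ 1 equals the recurrence started at time + 2T
theorem loopB_spec1 (N T : Int) (hN : 1 ≤ N) :
    ∀ (fuel : Nat) (rest : List Int), rest ≠ [] → rest.length ≤ fuel →
      ∀ (time trips : Int), 1 ≤ trips →
        loopB N T fuel (time, trips) rest =
          ((specT T (N.toNat - 1) (time + 2*T) rest).1,
           trips + (specT T (N.toNat - 1) (time + 2*T) rest).2) := by
  intro fuel
  induction fuel with
  | zero => intro rest hne hlen; cases rest <;> simp_all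
  | succ f ih =>
      intro rest hne hlen time trips htr
      cases rest with
      | nil => exact absurd rfl hne
      | cons c cs =>
        set m := N.toNat - 1 with hm
        have hNt : N.toNat = m + 1 := by omega
        have htr0 : ¬ (trips = 0) := by omega
        have hbatch : PySem.List.slice (c :: cs) none (some N) = c :: cs.take m := by
          rw [PySem.List.slice_to (c :: cs) (by omega : (0:Int) ≤ N), hNt]
          simp
        have hrest : PySem.List.slice (c :: cs) (some N) none = cs.drop m := by
          rw [PySem.List.slice_from (c :: cs) (by omega : (0:Int) ≤ N), hNt]
          simp
        simp only [loopB, hbatch, hrest]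
        rw [if_pos htr0, maxq_foldl, ← foldl_max_outer]
        cases hdrop : cs.drop m with
        | nil =>
            rw [specT_cons_nil T m (time + 2*T) c cs hdrop, loopB_nil]
        | cons d ds =>
            rw [specT_cons_cons T m (time + 2*T) c cs d ds hdrop]
            have hdlen : (d :: ds).length ≤ f := by
              have h1 : (d :: ds).length ≤ cs.length := by
                rw [← hdrop, List.length_drop]; omega
              simp only [List.length_cons] at hlen h1 ⊢
              omega
            rw [ih (d :: ds) (by simp) hdlen _ (trips + 1) (by omega)]
            refine Prod.ext rfl (by ring)

-- B's loop from trips = 0 equals the recurrence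
theorem loopB_spec0 (N T : Int) (hN : 1 ≤ N) (fuel : Nat) (rest : List Int)
    (hne : rest ≠ []) (hlen : rest.length ≤ fuel) (time : Int) :
    loopB N T fuel (time, 0) rest =
      ((specT T (N.toNat - 1) time rest).1, (specT T (N.toNat - 1) time rest).2) := by
  match fuel, rest with
  | 0, rest => cases rest <;> simp_all
  | f + 1, c :: cs =>
      set m := N.toNat - 1 with hm
      have hNt : N.toNat = m + 1 := by omega
      have hbatch : PySem.List.slice (c :: cs) none (some N) = c :: cs.take m := by
        rw [PySem.List.slice_to (c :: cs) (by omega : (0:Int) ≤ N), hNt]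
        simp
      have hrest : PySem.List.slice (c :: cs) (some N) none = cs.drop m := by
        rw [PySem.List.slice_from (c :: cs) (by omega : (0:Int) ≤ N), hNt]
        simp
      simp only [loopB, hbatch, hrest]
      rw [if_neg (by simp), maxq_foldl, ← foldl_max_outer]
      cases hdrop : cs.drop m with
      | nil =>
          rw [specT_cons_nil T m time c cs hdrop, loopB_nil]
          norm_num
      | cons d ds =>
          rw [specT_cons_cons T m time c cs d ds hdrop,
              show (0:Int) + 1 = 1 from by norm_num]
          have hdlen : (d :: ds).length ≤ f := by
            have h1 : (d :: ds).length ≤ cs.length := by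
              rw [← hdrop, List.length_drop]; omega
            simp only [List.length_cons] at hlen h1 ⊢
            omega
          rw [loopB_spec1 N T hN f (d :: ds) (by simp) hdlen _ 1 le_rfl]
          refine Prod.ext rfl (by ring)

-- ===== VERDICT (by name: the statement is the Claim_ definition above) =====
theorem solve_spec : Claim_equal_solve := by
  intro par hDom hPre
  unfold Spec_solve
  obtain ⟨N, T, M, cars⟩ := par
  cases cars with
  | nil =>
      simp only [solve, solve_alt, List.foldl_nil, ne_eq, not_true_eq_false, if_false,
        List.isEmpty_nil, if_true]
      decide
  | cons c cs =>
      have hN : 1 ≤ N := by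
        rcases hPre with h | h
        · exact h
        · simp at h
      obtain ⟨cap, hcap, hA⟩ :=
        foldA_spec N T hN (c :: cs).length (c :: cs) le_rfl (by simp) 0 0
      have hB := loopB_spec0 N T hN (c :: cs).length (c :: cs) (by simp) le_rfl 0
      simp only [solve, solve_alt, hA, hB, List.isEmpty_cons, Bool.false_eq_true, if_false]
      rw [if_pos hcap]
      rw [max_comm (PySem.List.pyGetD (c :: cs) (-1) 0 + T)
            ((specT T (N.toNat - 1) 0 (c :: cs)).1),
          show (0:Int) + (specT T (N.toNat - 1) 0 (c :: cs)).2 - 1 + 1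
              = (specT T (N.toNat - 1) 0 (c :: cs)).2 from by ring]
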